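-- pv_equiv track=rewrite | github.com/distbit0/integrate_notes | src/integrate_notes.py | _find_next_block_start
-- ===== SOURCE A (Python) =====
-- from typing import Any, Callable, List, Sequence, Tuple
--
-- def _find_next_block_start(
--     text: str, position: int, markers: Sequence[str]
-- ) -> tuple[int, str] | None:
--     candidates: List[tuple[int, str]] = []
--     for marker in markers:
--         index = text.find(marker, position)
--         if index != -1:
--             candidates.append((index, marker))
--     if not candidates:
--         return None
--     return min(candidates, key=lambda item: item[0])
-- ===== SOURCE B (Python) =====
-- def _find_next_block_start(text, position, markers):
--     for i in range(position, len(text) + 1):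
--         for marker in markers:
--             if text.startswith(marker, i):
--                 return (i, marker)
--     return None
-- ===== Notes on version B (the rewrite author's own statement) =====
-- stated objective: faster
-- what changed: A runs text.find once per marker and takes min-by-index over a candidate list; B scans the text left-to-right once from position and returns at the first index where any marker starts (checking markers in order, so ties break identically), so it stops at the answer instead of scanning the whole text per marker. Pre_ excludes negative positions, which are outside the function's natural domain: there A inherits str.find's negative-index wraparound while B's scan simply starts at position.
-- outside the precondition, e.g. on _find_next_block_start('ab', -1, ['a']): A returns None, B returns (0, 'a')
import Mathlib
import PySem

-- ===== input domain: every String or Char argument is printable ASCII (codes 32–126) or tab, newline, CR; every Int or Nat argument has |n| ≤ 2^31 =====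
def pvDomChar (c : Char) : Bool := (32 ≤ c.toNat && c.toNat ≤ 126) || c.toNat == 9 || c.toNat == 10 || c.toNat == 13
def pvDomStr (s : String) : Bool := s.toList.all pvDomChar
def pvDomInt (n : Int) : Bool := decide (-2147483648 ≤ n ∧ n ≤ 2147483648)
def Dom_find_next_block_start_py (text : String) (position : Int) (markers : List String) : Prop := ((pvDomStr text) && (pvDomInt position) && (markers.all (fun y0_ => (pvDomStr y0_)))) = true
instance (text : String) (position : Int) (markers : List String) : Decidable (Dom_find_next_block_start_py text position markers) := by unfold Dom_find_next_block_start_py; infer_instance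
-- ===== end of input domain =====

-- B replaces A's per-marker find + min-of-candidates with a single left-to-right scan of the
-- text from position that stops at the first index where any marker starts (alternative
-- decomposition; same tie-breaking: markers earlier in the list win at equal indices).

-- ===== PORT A =====
def find_next_block_start_py (text : String) (position : Int) (markers : List String) : Option (Int × String) :=
  let candidates : List (Int × String) := markers.foldl (fun candidates marker =>
    let index := PySem.Str.findFrom text marker position
    if index ≠ -1 then candidates ++ [(index, marker)] else candidates) []
  if candidates = [] then none
  else PySem.List.min? candidates (fun item => item.1)

-- ===== PORT B =====
-- inner `for marker in markers: if text.startswith(marker, i): return (i, marker)` of Source B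
-- (startswith at a nonnegative index i is exactly the prefix test on the drop)
def pvFirstMatch (cs : List Char) (i : Nat) : List String → Option String
  | [] => none
  | m :: rest => if m.toList.isPrefixOf (cs.drop i) then some m else pvFirstMatch cs i rest

-- outer `for i in range(position, len(text) + 1)` of Source B, fuel = number of remaining positions
def pvScan (cs : List Char) (markers : List String) : Nat → Nat → Option (Int × String)
  | _, 0 => none
  | i, f+1 =>
    match pvFirstMatch cs i markers with
    | some m => some ((i : Int), m)
    | none => pvScan cs markers (i+1) f

def find_next_block_start_py_alt (text : String) (position : Int) (markers : List String) : Option (Int × String) :=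
  let cs := text.toList
  -- `range(position, len(text) + 1)`: exact for position ≥ 0, which Pre_ guarantees
  pvScan cs markers position.toNat (cs.length + 1 - position.toNat)

-- ===== PRECONDITION & SPEC =====
-- Pre_ excludes negative positions: they lie outside the function's natural domain (position
-- is an index into text), and there A inherits str.find's negative-index wraparound.
def Pre_find_next_block_start_py (text : String) (position : Int) (markers : List String) : Prop :=
  0 ≤ position
instance (text : String) (position : Int) (markers : List String) : Decidable (Pre_find_next_block_start_py text position markers) := by unfold Pre_find_next_block_start_py; infer_instance

def pvWitness_find_next_block_start_py : String × Int × List String := ("ab a", 1, ["a", "b"])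

def Spec_find_next_block_start_py (text : String) (position : Int) (markers : List String) (out : Option (Int × String)) : Prop := out = find_next_block_start_py_alt text position markers
instance (text : String) (position : Int) (markers : List String) (out : Option (Int × String)) : Decidable (Spec_find_next_block_start_py text position markers out) := by unfold Spec_find_next_block_start_py; infer_instance

-- ===== CLAIM (what is proved, stated in full; the proofs are below) =====
def Claim_equal_find_next_block_start_py : Prop := ∀ (text : String) (position : Int) (markers : List String), Dom_find_next_block_start_py text position markers → Pre_find_next_block_start_py text position markers → Spec_find_next_block_start_py text position markers (find_next_block_start_py text position markers)

-- ===== LEMMAS AND PROOFS =====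

-- `find(sub, start)` with a start past the end of the string is -1 (CPython rule)
theorem pv_findFrom_oob (cs sub : List Char) (st : Int) (h : (cs.length : Int) < st) :
    PySem.Chars.findFrom cs sub st = -1 := by
  simp only [PySem.Chars.findFrom]
  split_ifs with h1 h2 h3 <;> omega

theorem pv_infix_drop_iff (sub cs : List Char) (s : Nat) :
    sub <:+: cs.drop s ↔ ∃ j, s ≤ j ∧ sub <+: cs.drop j := by
  rw [← PySem.Chars.isIn_iff_infix, ← PySem.Chars.exists_prefix_drop_iff_isIn]
  constructor
  · rintro ⟨j, hj⟩
    refine ⟨j + s, by omega, ?_⟩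
    rw [List.drop_drop] at hj
    rwa [Nat.add_comm j s]
  · rintro ⟨j, hsj, hj⟩
    refine ⟨j - s, ?_⟩
    rw [List.drop_drop, show s + (j - s) = j by omega]
    exact hj

theorem pv_findFrom_ge (cs sub : List Char) (s : Nat) (hs : s ≤ cs.length)
    (h : PySem.Chars.findFrom cs sub (s : Int) ≠ -1) :
    (s : Int) ≤ PySem.Chars.findFrom cs sub (s : Int) :=
  (PySem.Chars.findFrom_natCast_spec cs sub s hs h).1

-- sub starts at position s  ↔  find(sub, s) = s
theorem pv_match_iff (cs sub : List Char) (s : Nat) (hs : s ≤ cs.length) :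
    sub <+: cs.drop s ↔ PySem.Chars.findFrom cs sub (s : Int) = (s : Int) := by
  constructor
  · intro hp
    have hne : PySem.Chars.findFrom cs sub (s : Int) ≠ -1 := by
      rw [ne_eq, PySem.Chars.findFrom_natCast_eq_neg_one_iff cs sub s hs]
      simp only [not_not]
      exact hp.isInfix
    obtain ⟨h1, h2, h3⟩ := PySem.Chars.findFrom_natCast_spec cs sub s hs hne
    by_contra hne2
    have hlt : s < (PySem.Chars.findFrom cs sub (s:Int)).toNat := by omega
    exact h3 s le_rfl hlt hp
  · intro he
    have hne : PySem.Chars.findFrom cs sub (s : Int) ≠ -1 := by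
      rw [he]; omega
    have := (PySem.Chars.findFrom_natCast_spec cs sub s hs hne).2.1
    rwa [he, Int.toNat_natCast] at this

-- if no marker starts at s, find(sub, s) = find(sub, s+1)
theorem pv_step_nomatch (cs sub : List Char) (s : Nat) (hs : s ≤ cs.length)
    (hnm : ¬ sub <+: cs.drop s) :
    PySem.Chars.findFrom cs sub (s : Int) = PySem.Chars.findFrom cs sub ((s+1 : Nat) : Int) := by
  by_cases hsn : s = cs.length
  · have h1 : PySem.Chars.findFrom cs sub (s : Int) = -1 := by
      rw [PySem.Chars.findFrom_natCast_eq_neg_one_iff cs sub s hs, pv_infix_drop_iff]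
      rintro ⟨j, hsj, hj⟩
      have hd : cs.drop j = [] := List.drop_eq_nil_of_le (by omega)
      rw [hd] at hj
      have hsub : sub = [] := List.prefix_nil.mp hj
      subst hsub
      exact hnm (List.nil_prefix)
    have h2 : PySem.Chars.findFrom cs sub ((s+1:Nat) : Int) = -1 :=
      pv_findFrom_oob cs sub _ (by omega)
    rw [h1, h2]
  · have hs1 : s + 1 ≤ cs.length := by omega
    by_cases hin : sub <:+: cs.drop (s+1)
    · have hne1 : PySem.Chars.findFrom cs sub ((s+1:Nat) : Int) ≠ -1 := by
        rw [ne_eq, PySem.Chars.findFrom_natCast_eq_neg_one_iff cs sub (s+1) hs1]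
        simpa using hin
      have hne0 : PySem.Chars.findFrom cs sub (s : Int) ≠ -1 := by
        rw [ne_eq, PySem.Chars.findFrom_natCast_eq_neg_one_iff cs sub s hs]
        simp only [not_not]
        rw [pv_infix_drop_iff] at hin ⊢
        obtain ⟨j, hj1, hj2⟩ := hin
        exact ⟨j, by omega, hj2⟩
      obtain ⟨ha1, ha2, ha3⟩ := PySem.Chars.findFrom_natCast_spec cs sub s hs hne0
      obtain ⟨hb1, hb2, hb3⟩ := PySem.Chars.findFrom_natCast_spec cs sub (s+1) hs1 hne1
      set r0 := PySem.Chars.findFrom cs sub (s : Int) with hr0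
      set r1 := PySem.Chars.findFrom cs sub ((s+1:Nat) : Int) with hr1
      have h0s : r0.toNat ≠ s := by
        intro h; rw [h] at ha2; exact hnm ha2
      have hge : s + 1 ≤ r0.toNat := by
        have hh : (s:Int) ≤ r0 := ha1
        omega
      have heq : r0.toNat = r1.toNat := by
        by_contra hne
        rcases Nat.lt_or_ge r0.toNat r1.toNat with h | h
        · exact hb3 r0.toNat hge h ha2
        · exact ha3 r1.toNat (by omega) (by omega) hb2
      omega
    · have h1 : PySem.Chars.findFrom cs sub ((s+1:Nat) : Int) = -1 := by
        rw [PySem.Chars.findFrom_natCast_eq_neg_one_iff cs sub (s+1) hs1]; exact hin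
      have h0 : PySem.Chars.findFrom cs sub (s : Int) = -1 := by
        rw [PySem.Chars.findFrom_natCast_eq_neg_one_iff cs sub s hs, pv_infix_drop_iff]
        rintro ⟨j, hj1, hj2⟩
        rcases Nat.eq_or_lt_of_le hj1 with h | h
        · exact hnm (h ▸ hj2)
        · exact hin ((pv_infix_drop_iff sub cs (s+1)).mpr ⟨j, by omega, hj2⟩)
      rw [h0, h1]

-- A's candidate-building loop as a filterMap
theorem pv_foldl_cand (cs : List Char) (position : Int) (markers : List String) (acc : List (Int × String)) :
    markers.foldl (fun c m =>
        if PySem.Chars.findFrom cs m.toList position ≠ -1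
        then c ++ [(PySem.Chars.findFrom cs m.toList position, m)] else c) acc
      = acc ++ markers.filterMap (fun m =>
        if PySem.Chars.findFrom cs m.toList position ≠ -1
        then some (PySem.Chars.findFrom cs m.toList position, m) else none) := by
  induction markers generalizing acc with
  | nil => simp
  | cons m rest ih =>
    by_cases h : PySem.Chars.findFrom cs m.toList position ≠ -1
    · rw [List.foldl_cons, if_pos h,
        List.filterMap_cons_some (b := (PySem.Chars.findFrom cs m.toList position, m)) (by simp [h]),
        ih, List.append_assoc, List.singleton_append]
    · rw [List.foldl_cons, if_neg h, List.filterMap_cons_none (by simp only [ne_eq, not_not] at h; simp [h]), ih]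

-- the running-min loop never moves off a minimal element
theorem pv_foldl_min_stay {α : Type} (key : α → Int) (t : List α) (a : α)
    (h : ∀ y ∈ t, key a ≤ key y) :
    t.foldl (fun acc x => match acc with
      | none => some x
      | some m => if key x < key m then some x else some m) (some a) = some a := by
  induction t with
  | nil => rfl
  | cons y t' ih =>
    simp only [List.foldl_cons]
    have hy : ¬ key y < key a := not_lt.mpr (h y (by simp))
    simp only [if_neg hy]
    exact ih (fun z hz => h z (by simp [hz]))

-- the running-min loop returns the FIRST element attaining the minimum b
theorem pv_foldl_min_first {α : Type} (key : α → Int) (b : Int) (t : List α) :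
    ∀ (a : α), b < key a → (∀ y ∈ t, b ≤ key y) → (∃ y ∈ t, key y = b) →
    t.foldl (fun acc x => match acc with
      | none => some x
      | some m => if key x < key m then some x else some m) (some a)
      = t.find? (fun y => key y == b) := by
  induction t with
  | nil => rintro a _ _ ⟨y, hy, _⟩; simp at hy
  | cons y t' ih =>
    intro a ha hall hex
    simp only [List.foldl_cons, List.find?_cons]
    by_cases hy : key y = b
    · simp only [hy, beq_self_eq_true]
      simp only [if_pos ha]
      exact pv_foldl_min_stay key t' y (fun z hz => hy ▸ hall z (by simp [hz]))
    · have hbeq : (key y == b) = false := by simpa using hy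
      simp only [hbeq]
      have hby : b < key y := lt_of_le_of_ne (hall y (by simp)) (fun h => hy h.symm)
      have hex' : ∃ z ∈ t', key z = b := by
        obtain ⟨z, hz, hzb⟩ := hex
        rcases List.mem_cons.mp hz with h | h
        · exact absurd (h ▸ hzb) hy
        · exact ⟨z, h, hzb⟩
      have hall' : ∀ z ∈ t', b ≤ key z := fun z hz => hall z (by simp [hz])
      by_cases hlt : key y < key a
      · simp only [if_pos hlt]
        exact ih y hby hall' hex'
      · simp only [if_neg hlt]
        exact ih a ha hall' hex'

-- Python's min(xs, key) picks the first element attaining the minimum value b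
theorem pv_min?_first {α : Type} (key : α → Int) (b : Int) (xs : List α)
    (hall : ∀ y ∈ xs, b ≤ key y) (hex : ∃ y ∈ xs, key y = b) :
    PySem.List.min? xs key = xs.find? (fun y => key y == b) := by
  cases xs with
  | nil => obtain ⟨y, hy, _⟩ := hex; simp at hy
  | cons x t =>
    simp only [PySem.List.min?, List.foldl_cons, List.find?_cons]
    by_cases hx : key x = b
    · simp only [hx, beq_self_eq_true]
      exact pv_foldl_min_stay key t x (fun z hz => hx ▸ hall z (by simp [hz]))
    · have hbeq : (key x == b) = false := by simpa using hx
      simp only [hbeq]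
      have hbx : b < key x := lt_of_le_of_ne (hall x (by simp)) (fun h => hx h.symm)
      refine pv_foldl_min_first key b t x hbx (fun z hz => hall z (by simp [hz])) ?_
      obtain ⟨z, hz, hzb⟩ := hex
      rcases List.mem_cons.mp hz with h | h
      · exact absurd (h ▸ hzb) hx
      · exact ⟨z, h, hzb⟩

-- A's result (candidates built from start position s, then min-by-index) as one function
def pvAfun (cs : List Char) (markers : List String) (s : Nat) : Option (Int × String) :=
  let cand := markers.filterMap (fun m =>
    if PySem.Chars.findFrom cs m.toList (s : Int) ≠ -1
    then some (PySem.Chars.findFrom cs m.toList (s : Int), m) else none)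
  if cand = [] then none else PySem.List.min? cand (fun item => item.1)

theorem pv_firstMatch_none (cs : List Char) (s : Nat) (markers : List String)
    (h : pvFirstMatch cs s markers = none) :
    ∀ m ∈ markers, ¬ m.toList <+: cs.drop s := by
  induction markers with
  | nil => simp
  | cons m rest ih =>
    intro m' hm'
    simp only [pvFirstMatch] at h
    by_cases hp : m.toList.isPrefixOf (cs.drop s)
    · simp [hp] at h
    · rcases List.mem_cons.mp hm' with h' | h'
      · subst h'; rwa [List.isPrefixOf_iff_prefix] at hp
      · exact ih (by simpa [hp] using h) m' h'

theorem pv_firstMatch_mem (cs : List Char) (s : Nat) (markers : List String) (m : String)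
    (h : pvFirstMatch cs s markers = some m) :
    m ∈ markers ∧ m.toList <+: cs.drop s := by
  induction markers with
  | nil => simp [pvFirstMatch] at h
  | cons m' rest ih =>
    simp only [pvFirstMatch] at h
    by_cases hp : m'.toList.isPrefixOf (cs.drop s)
    · simp only [if_pos hp, Option.some.injEq] at h
      subst h
      exact ⟨by simp, List.isPrefixOf_iff_prefix.mp hp⟩
    · obtain ⟨h1, h2⟩ := ih (by simpa [hp] using h)
      exact ⟨by simp [h1], h2⟩

-- first candidate with index s = first marker that starts at s
theorem pv_find?_cand (cs : List Char) (s : Nat) (hs : s ≤ cs.length) (markers : List String) :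
    (markers.filterMap (fun m =>
        if PySem.Chars.findFrom cs m.toList (s : Int) ≠ -1
        then some (PySem.Chars.findFrom cs m.toList (s : Int), m) else none)).find?
      (fun y => y.1 == (s : Int))
      = (pvFirstMatch cs s markers).map (fun m => ((s : Int), m)) := by
  induction markers with
  | nil => rfl
  | cons m rest ih =>
    simp only [List.filterMap_cons, pvFirstMatch]
    by_cases hp : m.toList.isPrefixOf (cs.drop s)
    · have hm : PySem.Chars.findFrom cs m.toList (s : Int) = (s : Int) :=
        (pv_match_iff cs m.toList s hs).mp (List.isPrefixOf_iff_prefix.mp hp)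
      simp [hm, hp]
    · have hnm : ¬ m.toList <+: cs.drop s := by
        rwa [List.isPrefixOf_iff_prefix] at hp
      have hne : PySem.Chars.findFrom cs m.toList (s : Int) ≠ (s : Int) :=
        fun h => hnm ((pv_match_iff cs m.toList s hs).mpr h)
      by_cases h1 : PySem.Chars.findFrom cs m.toList (s : Int) ≠ -1
      · have hbeq : (PySem.Chars.findFrom cs m.toList (s : Int) == (s : Int)) = false := by
          simpa using hne
        simp only [if_pos h1, List.find?_cons, hbeq, if_neg hp]
        exact ih
      · simp only [if_neg h1, if_neg hp]
        exact ih

-- main induction: A's min-of-candidates from position s equals B's scan from position s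
theorem pv_main (cs : List Char) (markers : List String) :
    ∀ (f s : Nat), s + f = cs.length + 1 →
      pvAfun cs markers s = pvScan cs markers s f := by
  intro f
  induction f with
  | zero =>
    intro s hsf
    have hoob : ∀ m ∈ markers, PySem.Chars.findFrom cs m.toList (s : Int) = -1 :=
      fun m _ => pv_findFrom_oob cs m.toList _ (by omega)
    simp only [pvAfun, pvScan]
    have hcand : markers.filterMap (fun m =>
        if PySem.Chars.findFrom cs m.toList (s : Int) ≠ -1
        then some (PySem.Chars.findFrom cs m.toList (s : Int), m) else none) = [] := by
      rw [List.filterMap_eq_nil_iff]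
      intro m hm
      simp [hoob m hm]
    rw [hcand]
    simp
  | succ f ih =>
    intro s hsf
    have hs : s ≤ cs.length := by omega
    cases hfm : pvFirstMatch cs s markers with
    | some m0 =>
      obtain ⟨hmem, hpre⟩ := pv_firstMatch_mem cs s markers m0 hfm
      have hm0 : PySem.Chars.findFrom cs m0.toList (s : Int) = (s : Int) :=
        (pv_match_iff cs m0.toList s hs).mp hpre
      have hel : ((s : Int), m0) ∈ markers.filterMap (fun m =>
          if PySem.Chars.findFrom cs m.toList (s : Int) ≠ -1
          then some (PySem.Chars.findFrom cs m.toList (s : Int), m) else none) := by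
        rw [List.mem_filterMap]
        refine ⟨m0, hmem, ?_⟩
        rw [hm0]
        simp
      simp only [pvAfun, pvScan, hfm]
      rw [if_neg (List.ne_nil_of_mem hel)]
      rw [pv_min?_first (fun item => item.1) (s : Int) _
        (fun y hy => by
          rw [List.mem_filterMap] at hy
          obtain ⟨m, hm, hsome⟩ := hy
          by_cases hne : PySem.Chars.findFrom cs m.toList (s : Int) ≠ -1
          · simp only [if_pos hne, Option.some.injEq] at hsome
            rw [← hsome]
            exact pv_findFrom_ge cs m.toList s hs hne
          · simp [if_neg hne] at hsome)
        ⟨((s : Int), m0), hel, rfl⟩]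
      rw [pv_find?_cand cs s hs markers, hfm]
      rfl
    | none =>
      have hnm := pv_firstMatch_none cs s markers hfm
      have hstep : pvAfun cs markers s = pvAfun cs markers (s+1) := by
        simp only [pvAfun]
        rw [List.filterMap_congr (fun m hm => by
          rw [pv_step_nomatch cs m.toList s hs (hnm m hm)])]
      rw [hstep, ih (s+1) (by omega)]
      simp only [pvScan, hfm]

-- ===== VERDICT (by name: the statement is the Claim_ definition above) =====
theorem find_next_block_start_py_spec : Claim_equal_find_next_block_start_py := by
  intro text position markers _ hpre
  unfold Pre_find_next_block_start_py at hpre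
  unfold Spec_find_next_block_start_py
  unfold find_next_block_start_py find_next_block_start_py_alt
  simp only [PySem.Str.findFrom_eq]
  set cs := text.toList with hcs
  by_cases hpos : position > (cs.length : Int)
  · have hoob : ∀ m ∈ markers, PySem.Chars.findFrom cs m.toList position = -1 :=
      fun m _ => pv_findFrom_oob cs m.toList position (by omega)
    rw [pv_foldl_cand cs position markers []]
    have hcand : markers.filterMap (fun m =>
        if PySem.Chars.findFrom cs m.toList position ≠ -1
        then some (PySem.Chars.findFrom cs m.toList position, m) else none) = [] := by
      rw [List.filterMap_eq_nil_iff]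
      intro m hm
      simp [hoob m hm]
    simp only [List.nil_append]
    rw [hcand]
    have hfuel : cs.length + 1 - position.toNat = 0 := by omega
    rw [hfuel]
    simp [pvScan]
  · have hcast : ((position.toNat : Nat) : Int) = position := Int.toNat_of_nonneg hpre
    rw [pv_foldl_cand cs position markers []]
    rw [List.filterMap_congr (fun m _ => by rw [← hcast])]
    have hmain := pv_main cs markers (cs.length + 1 - position.toNat) position.toNat (by omega)
    simp only [pvAfun] at hmain
    simpa [hcast] using hmain
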